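-- pv_equiv track=rewrite | github.com/koyahi/atcoder | abc/192/d/main.py | equal_or_smaller_than_M
-- ===== SOURCE A (Python) =====
-- def equal_or_smaller_than_M(X, n, M):
--     X_reversed = reversed(X)
--     base = 1
--     num = 0
--     for x in X_reversed:
--         num += x * base
--         base *= n
--     return num <= M
-- ===== SOURCE B (Python) =====
-- def equal_or_smaller_than_M(X, n, M):
--     num = 0
--     for x in X:
--         num = num * n + x
--     return num <= M
-- ===== Notes on version B (the rewrite author's own statement) =====
-- stated objective: simpler
-- what changed: B evaluates the base-n value with Horner's recurrence (num = num*n + x) in a single forward pass, instead of reversing X and maintaining a separate place-value power variable.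
import Mathlib
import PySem

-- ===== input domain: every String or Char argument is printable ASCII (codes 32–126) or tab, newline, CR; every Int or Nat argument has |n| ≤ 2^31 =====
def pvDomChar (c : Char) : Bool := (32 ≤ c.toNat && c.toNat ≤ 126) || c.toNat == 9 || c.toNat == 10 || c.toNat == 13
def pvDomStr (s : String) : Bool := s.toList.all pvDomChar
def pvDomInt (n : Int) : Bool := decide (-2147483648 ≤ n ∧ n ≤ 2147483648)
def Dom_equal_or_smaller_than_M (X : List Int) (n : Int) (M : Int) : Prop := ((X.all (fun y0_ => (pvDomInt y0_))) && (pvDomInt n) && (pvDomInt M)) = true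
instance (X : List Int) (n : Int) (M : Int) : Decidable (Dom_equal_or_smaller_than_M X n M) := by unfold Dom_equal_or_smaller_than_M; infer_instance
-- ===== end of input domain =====

-- B replaces A's reverse-and-place-value evaluation by a forward Horner pass (simpler decomposition; same value, proved equal).

-- ===== PORT A =====
-- A: iterate over reversed(X), keeping (num, base); num += x*base, base *= n; return num <= M
def equal_or_smaller_than_M (X : List Int) (n : Int) (M : Int) : Bool :=
  let s := X.reverse.foldl (fun (s : Int × Int) x => (s.1 + x * s.2, s.2 * n)) (0, 1)
  decide (s.1 ≤ M)

-- ===== PORT B =====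
-- B: forward Horner pass: num = num * n + x; return num <= M
def equal_or_smaller_than_M_alt (X : List Int) (n : Int) (M : Int) : Bool :=
  decide ((X.foldl (fun num x => num * n + x) 0) ≤ M)

-- ===== PRECONDITION & SPEC =====
def Spec_equal_or_smaller_than_M (X : List Int) (n : Int) (M : Int) (out : Bool) : Prop := out = equal_or_smaller_than_M_alt X n M
instance (X : List Int) (n : Int) (M : Int) (out : Bool) : Decidable (Spec_equal_or_smaller_than_M X n M out) := by unfold Spec_equal_or_smaller_than_M; infer_instance

-- ===== CLAIM (what is proved, stated in full; the proofs are below) =====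
def Claim_equal_equal_or_smaller_than_M : Prop := ∀ (X : List Int) (n : Int) (M : Int), Dom_equal_or_smaller_than_M X n M → Spec_equal_or_smaller_than_M X n M (equal_or_smaller_than_M X n M)

-- ===== LEMMAS AND PROOFS =====

-- A's loop invariant: the first component of the pair fold is num + base * (foldr Horner step)
theorem fold_fst_eq (n : Int) (L : List Int) (num base : Int) :
    (L.foldl (fun (s : Int × Int) x => (s.1 + x * s.2, s.2 * n)) (num, base)).1
      = num + base * L.foldr (fun x acc => x + n * acc) 0 := by
  induction L generalizing num base with
  | nil => simp
  | cons y ys ih => simp [List.foldl, ih]; ring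

theorem valA_eq_valB (n : Int) (X : List Int) :
    (X.reverse.foldl (fun (s : Int × Int) x => (s.1 + x * s.2, s.2 * n)) (0, 1)).1
      = X.foldl (fun num x => num * n + x) 0 := by
  rw [fold_fst_eq, List.foldr_reverse]
  have h : (fun (acc x : Int) => x + n * acc) = (fun num x => num * n + x) := by
    funext a b; ring
  rw [h]; ring

-- ===== VERDICT (by name: the statement is the Claim_ definition above) =====
theorem equal_or_smaller_than_M_spec : Claim_equal_equal_or_smaller_than_M := by
  intro X n M _
  unfold Spec_equal_or_smaller_than_M equal_or_smaller_than_M equal_or_smaller_than_M_alt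
  simp only [valA_eq_valB]
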